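-- pv_equiv track=rewrite | github.com/eman00001/JSON_Scanner_Parser | parser.py | str_to_token
-- ===== SOURCE A (Python) =====
-- def str_to_token(str):
--     i=1
--     j=0
--     last = 0
--     token_type = ''
--     token_content = ''
--
--     while i<len(str) and str[i] != ',':
--         token_type+=str[i]
--         i+=1
--
--     # Skip space and comma
--     i+=2
--
--     # Find the index of the last char of str in order to be able to accept
--     # string token such as <STRING, J>MM>ohn>
--     while j<len(str) and str[j] != '\n':
--         if str[j] == '>':
--             last = j
--         j+=1
--
--     while i<len(str) and str[i] != '\n':
--         if str[i] == '>' and i==last: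
--             break
--         token_content+=str[i]
--         i+=1
--
--     return [token_type, token_content]
-- ===== SOURCE B (Python) =====
-- def str_to_token(str):
--     n = len(str)
--     comma = str.find(',', 1)
--     if comma == -1:
--         comma = n
--     token_type = str[1:comma]
--     start = comma + 2
--     nl = str.find('\n')
--     limit = nl if nl != -1 else n
--     last = str.rfind('>', 0, limit)
--     if last == -1:
--         last = 0
--     if last >= start:
--         end = last
--     else:
--         nl2 = str.find('\n', start)
--         end = nl2 if nl2 != -1 else n
--     return [token_type, str[start:end]]
-- ===== Notes on version B (the rewrite author's own statement) =====
-- stated objective: simpler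
-- what changed: Replaces A's three manual scan-and-accumulate while loops with direct delimiter-index computation (str.find for the comma and newlines, str.rfind for the last '>' before the first newline) and two slices.
import Mathlib
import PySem

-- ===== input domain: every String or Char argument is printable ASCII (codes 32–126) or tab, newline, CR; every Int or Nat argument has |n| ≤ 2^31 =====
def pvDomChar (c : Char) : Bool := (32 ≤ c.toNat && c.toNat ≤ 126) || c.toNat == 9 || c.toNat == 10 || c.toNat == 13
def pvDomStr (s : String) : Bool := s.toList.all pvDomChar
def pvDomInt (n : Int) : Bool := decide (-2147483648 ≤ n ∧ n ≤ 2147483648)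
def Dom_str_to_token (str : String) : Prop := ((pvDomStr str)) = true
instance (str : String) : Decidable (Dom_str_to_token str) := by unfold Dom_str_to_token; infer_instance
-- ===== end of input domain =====

-- B replaces A's three character-accumulating while loops by find/rfind index computations plus slicing (simpler decomposition; same return value on every input).

-- ===== PORT A =====
-- while i<len(str) and str[i] != ',': token_type += str[i]; i += 1
def aLoop1 (s : List Char) (i : Nat) (acc : List Char) : List Char × Nat :=
  if h : i < s.length then
    if s[i] ≠ ',' then aLoop1 s (i+1) (acc ++ [s[i]]) else (acc, i)
  else (acc, i)
termination_by s.length - i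

-- while j<len(str) and str[j] != '\n': if str[j] == '>': last = j; j += 1
def aLoop2 (s : List Char) (j : Nat) (last : Nat) : Nat :=
  if h : j < s.length then
    if s[j] ≠ '\n' then aLoop2 s (j+1) (if s[j] = '>' then j else last) else last
  else last
termination_by s.length - j

-- while i<len(str) and str[i] != '\n': if str[i] == '>' and i==last: break; token_content += str[i]; i += 1
def aLoop3 (s : List Char) (i : Nat) (last : Nat) (acc : List Char) : List Char :=
  if h : i < s.length then
    if s[i] ≠ '\n' then
      if s[i] = '>' ∧ i = last then acc
      else aLoop3 s (i+1) last (acc ++ [s[i]])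
    else acc
  else acc
termination_by s.length - i

def str_to_token (str : String) : List String :=
  let s := str.toList
  let t1 := aLoop1 s 1 []
  let token_type := t1.1
  let i := t1.2 + 2
  let last := aLoop2 s 0 0
  let token_content := aLoop3 s i last []
  [String.ofList token_type, String.ofList token_content]

-- ===== PORT B =====
def str_to_token_alt (str : String) : List String :=
  let s := str.toList
  let n : Int := s.length
  let comma0 := PySem.Chars.findFrom s [','] 1
  let comma := if comma0 = -1 then n else comma0
  let token_type := PySem.Chars.slice s (some 1) (some comma)
  let start := comma + 2
  let nl := PySem.Chars.find s ['\n']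
  let limit := if nl ≠ -1 then nl else n
  let last0 := PySem.Chars.rfindFrom s ['>'] 0 (some limit)
  let last := if last0 = -1 then 0 else last0
  let e := if last ≥ start then last
           else
             let nl2 := PySem.Chars.findFrom s ['\n'] start
             if nl2 ≠ -1 then nl2 else n
  [String.ofList token_type, String.ofList (PySem.Chars.slice s (some start) (some e))]

-- ===== PRECONDITION & SPEC =====
def Spec_str_to_token (str : String) (out : List String) : Prop := out = str_to_token_alt str
instance (str : String) (out : List String) : Decidable (Spec_str_to_token str out) := by unfold Spec_str_to_token; infer_instance

-- ===== CLAIM (what is proved, stated in full; the proofs are below) =====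
def Claim_equal_str_to_token : Prop := ∀ (str : String), Dom_str_to_token str → Spec_str_to_token str (str_to_token str)

-- ===== LEMMAS AND PROOFS =====

-- abbreviations for the common closed forms
def pvTw (c : Char) (t : List Char) : List Char := t.takeWhile (· != c)
def pvTT (s : List Char) : List Char := pvTw ',' (s.drop 1)
def pvStart (s : List Char) : Nat := (pvTT s).length + 3
def pvFNL (s : List Char) : Nat := (pvTw '\n' s).length
def pvLast (s : List Char) : Nat := aLoop2 s 0 0
def pvNoGt (s : List Char) (a b : Nat) : Prop := ∀ i, a ≤ i → i < b → s[i]? ≠ some '>'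
def pvContentAt (s : List Char) (st la : Nat) : List Char :=
  if st ≤ la then (s.drop st).take (la - st) else pvTw '\n' (s.drop st)

theorem pvTwLe (c : Char) (t : List Char) : (pvTw c t).length ≤ t.length :=
  (List.takeWhile_prefix _).length_le

theorem pvTwLen (c : Char) (t : List Char) (k : Nat) (hk : t[k]? = some c)
    (hlt : ∀ i, i < k → t[i]? ≠ some c) : (pvTw c t).length = k := by
  induction t generalizing k with
  | nil => simp at hk
  | cons d t ih =>
    cases k with
    | zero =>
      simp only [List.getElem?_cons_zero, Option.some.injEq] at hk
      simp [pvTw, List.takeWhile_cons, hk]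
    | succ k =>
      have h0 : d ≠ c := by
        have := hlt 0 (by omega); simpa using this
      simp only [List.getElem?_cons_succ] at hk
      have ihk := ih k hk (fun i hi => by
        have := hlt (i+1) (by omega); simpa using this)
      simp [pvTw, List.takeWhile_cons, bne_iff_ne, h0] at ihk ⊢
      omega

theorem pvTwPred (c : Char) (t : List Char) (i : Nat) (h : i < (pvTw c t).length) :
    t[i]? ≠ some c := by
  induction t generalizing i with
  | nil => simp [pvTw] at h
  | cons d t ih =>
    by_cases hd : d = c
    · subst hd; simp [pvTw, List.takeWhile_cons] at h
    · simp only [pvTw, List.takeWhile_cons, bne_iff_ne, ne_eq, hd, not_false_eq_true,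
        decide_true, if_true, List.length_cons] at h
      cases i with
      | zero => simpa using hd
      | succ i =>
        simp only [List.getElem?_cons_succ]
        exact ih i (by simpa [pvTw] using Nat.lt_of_succ_lt_succ h)

theorem pvTwStop (c : Char) (t : List Char) (h : (pvTw c t).length < t.length) :
    t[(pvTw c t).length]? = some c := by
  induction t with
  | nil => simp [pvTw] at h
  | cons d t ih =>
    by_cases hd : d = c
    · subst hd; simp [pvTw, List.takeWhile_cons]
    · simp only [pvTw, List.takeWhile_cons, bne_iff_ne, ne_eq, hd, not_false_eq_true,
        decide_true, if_true, List.length_cons] at h ⊢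
      simpa [pvTw] using ih (by simpa [pvTw] using Nat.lt_of_succ_lt_succ h)

theorem pvTwAll (c : Char) (t : List Char) (h : c ∉ t) : pvTw c t = t := by
  refine List.takeWhile_eq_self_iff.mpr ?_
  intro x hx
  simp only [bne_iff_ne, ne_eq, decide_eq_true_eq]
  rintro rfl
  exact h hx

theorem pvTakeTw (p : Char → Bool) (t : List Char) :
    t.take ((t.takeWhile p).length) = t.takeWhile p := by
  induction t with
  | nil => rfl
  | cons d t ih => by_cases hd : p d <;> simp [List.takeWhile_cons, hd, ih]

theorem pvPrefixSingleton (c : Char) (u : List Char) : [c] <+: u ↔ u[0]? = some c := by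
  cases u with
  | nil => simp
  | cons d t => simp [List.cons_prefix_cons, eq_comm]

theorem pvMemInfix (c : Char) (t : List Char) : [c] <:+: t ↔ c ∈ t := by
  constructor
  · rintro ⟨l, r, rfl⟩; simp
  · intro h
    obtain ⟨u, v, rfl⟩ := List.append_of_mem h
    exact ⟨u, v, by simp⟩

theorem pvFindSingle (t : List Char) (c : Char) :
    PySem.Chars.find t [c] = if c ∈ t then (((pvTw c t).length : Nat) : Int) else -1 := by
  by_cases h : c ∈ t
  · have hinf : [c] <:+: t := (pvMemInfix c t).mpr h
    have h0 : 0 ≤ PySem.Chars.find t [c] := (PySem.Chars.find_nonneg_iff t [c]).mpr hinf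
    obtain ⟨hpre, hmin⟩ := PySem.Chars.find_spec h0
    have hk : t[(PySem.Chars.find t [c]).toNat]? = some c := by
      have h1 := (pvPrefixSingleton c _).mp hpre
      rw [List.getElem?_drop] at h1
      simpa using h1
    have hlt : ∀ i, i < (PySem.Chars.find t [c]).toNat → t[i]? ≠ some c := by
      intro i hi hic
      exact hmin i hi ((pvPrefixSingleton c _).mpr (by rw [List.getElem?_drop]; simpa using hic))
    rw [if_pos h, pvTwLen c t _ hk hlt, Int.toNat_of_nonneg h0]
  · rw [if_neg h]
    exact (PySem.Chars.find_eq_neg_one_iff t [c]).mpr (fun hinf => h ((pvMemInfix c t).mp hinf))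

theorem pvRgoNone (t : List Char) (c : Char) (j : Nat)
    (h : ∀ i, i ≤ j → t[i]? ≠ some c) : PySem.Chars.rfind.go t [c] j = -1 := by
  induction j with
  | zero =>
    rw [PySem.Chars.rfind.go, if_neg]
    intro hp
    exact h 0 le_rfl ((pvPrefixSingleton c t).mp (List.isPrefixOf_iff_prefix.mp hp))
  | succ j ih =>
    rw [PySem.Chars.rfind.go, if_neg, ih (fun i hi => h i (by omega))]
    intro hp
    have h1 := (pvPrefixSingleton c _).mp (List.isPrefixOf_iff_prefix.mp hp)
    rw [List.getElem?_drop] at h1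
    exact h (j+1) le_rfl (by simpa using h1)

theorem pvRgoEq (t : List Char) (c : Char) (k j : Nat) (hkj : k ≤ j) (hk : t[k]? = some c)
    (hmax : ∀ i, k < i → i ≤ j → t[i]? ≠ some c) :
    PySem.Chars.rfind.go t [c] j = (k : Int) := by
  induction j with
  | zero =>
    have hk0 : k = 0 := by omega
    subst hk0
    rw [PySem.Chars.rfind.go,
      if_pos (List.isPrefixOf_iff_prefix.mpr ((pvPrefixSingleton c t).mpr hk))]
    simp
  | succ j ih =>
    rw [PySem.Chars.rfind.go]
    by_cases hkj1 : k = j + 1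
    · subst hkj1
      rw [if_pos (List.isPrefixOf_iff_prefix.mpr ((pvPrefixSingleton c _).mpr
        (by rw [List.getElem?_drop]; simpa using hk)))]
    · rw [if_neg, ih (by omega) (fun i h1 h2 => hmax i h1 (by omega))]
      intro hp
      have h1 := (pvPrefixSingleton c _).mp (List.isPrefixOf_iff_prefix.mp hp)
      rw [List.getElem?_drop] at h1
      exact hmax (j+1) (by omega) le_rfl (by simpa using h1)

theorem aLoop1_eq (s : List Char) (i : Nat) (acc : List Char) :
    aLoop1 s i acc =
      (acc ++ (s.drop i).takeWhile (· != ','), i + ((s.drop i).takeWhile (· != ',')).length) := by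
  rw [aLoop1]
  split
  · rename_i h
    by_cases hc : s[i] = ','
    · rw [if_neg (by simp [hc])]
      rw [List.drop_eq_getElem_cons h, List.takeWhile_cons, if_neg (by simp [hc])]
      simp
    · rw [if_pos hc]
      rw [aLoop1_eq s (i+1) (acc ++ [s[i]])]
      rw [List.drop_eq_getElem_cons h, List.takeWhile_cons, if_pos (by simpa [bne_iff_ne] using hc)]
      simp only [Prod.mk.injEq, List.append_assoc, List.singleton_append, List.length_cons]
      exact ⟨trivial, by omega⟩
  · rename_i h
    rw [List.drop_eq_nil_of_le (by omega)]
    simp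
termination_by s.length - i

theorem aLoop2_spec (s : List Char) (j last : Nat) (hj : j ≤ pvFNL s)
    (hinv : (last = 0 ∧ pvNoGt s 0 j) ∨ (last < j ∧ s[last]? = some '>' ∧ pvNoGt s (last+1) j)) :
    (aLoop2 s j last = 0 ∧ pvNoGt s 0 (pvFNL s)) ∨
      (aLoop2 s j last < pvFNL s ∧ s[aLoop2 s j last]? = some '>' ∧
        pvNoGt s (aLoop2 s j last + 1) (pvFNL s)) := by
  have hfle : pvFNL s ≤ s.length := pvTwLe '\n' s
  rw [aLoop2]
  split
  · rename_i h
    by_cases hnl : s[j] = '\n'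
    · rw [if_neg (by simp [hnl])]
      have hjf : j = pvFNL s := by
        rcases Nat.lt_or_ge j (pvFNL s) with hlt | hge
        · exact absurd (by simp [List.getElem?_eq_getElem h, hnl] : s[j]? = some '\n')
            (pvTwPred '\n' s j hlt)
        · omega
      rw [← hjf]
      exact hinv
    · rw [if_pos hnl]
      have hjlt : j < pvFNL s := by
        rcases Nat.lt_or_ge j (pvFNL s) with hlt | hge
        · exact hlt
        · have hje : pvFNL s = j := by omega
          have hflt : (pvTw '\n' s).length < s.length := by
            have hx : pvFNL s < s.length := by omega
            simpa [pvFNL] using hx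
          have hstop := pvTwStop '\n' s hflt
          rw [show (pvTw '\n' s).length = j from by simpa [pvFNL] using hje,
            List.getElem?_eq_getElem h] at hstop
          exact absurd (Option.some.inj hstop) hnl
      by_cases hg : s[j] = '>'
      · rw [if_pos hg]
        refine aLoop2_spec s (j+1) j (by omega)
          (Or.inr ⟨by omega, by simp [List.getElem?_eq_getElem h, hg], ?_⟩)
        intro i h1 h2; omega
      · rw [if_neg hg]
        have hnew : s[j]? ≠ some '>' := by
          rw [List.getElem?_eq_getElem h]; simpa using hg
        refine aLoop2_spec s (j+1) last (by omega) ?_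
        rcases hinv with ⟨h1, h2⟩ | ⟨h1, h2, h3⟩
        · refine Or.inl ⟨h1, ?_⟩
          intro i hi1 hi2
          rcases Nat.lt_or_eq_of_le (Nat.lt_succ_iff.mp hi2) with h' | h'
          · exact h2 i hi1 h'
          · rw [h']; exact hnew
        · refine Or.inr ⟨by omega, h2, ?_⟩
          intro i hi1 hi2
          rcases Nat.lt_or_eq_of_le (Nat.lt_succ_iff.mp hi2) with h' | h'
          · exact h3 i hi1 h'
          · rw [h']; exact hnew
  · rename_i h
    have hjf : j = pvFNL s := by omega
    rw [← hjf]
    exact hinv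
termination_by s.length - j

theorem aLoop3_no_break (s : List Char) (i last : Nat) (acc : List Char) (h : last < i) :
    aLoop3 s i last acc = acc ++ (s.drop i).takeWhile (· != '\n') := by
  rw [aLoop3]
  split
  · rename_i hi
    by_cases hnl : s[i] = '\n'
    · rw [if_neg (by simp [hnl])]
      rw [List.drop_eq_getElem_cons hi, List.takeWhile_cons, if_neg (by simp [hnl])]
      simp
    · rw [if_pos hnl]
      rw [if_neg (by rintro ⟨-, h'⟩; omega)]
      rw [aLoop3_no_break s (i+1) last (acc ++ [s[i]]) (by omega)]
      rw [List.drop_eq_getElem_cons hi, List.takeWhile_cons, if_pos (by simpa [bne_iff_ne] using hnl)]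
      simp
  · rename_i hi
    rw [List.drop_eq_nil_of_le (by omega)]
    simp
termination_by s.length - i

theorem aLoop3_break (s : List Char) (i last : Nat) (acc : List Char) (hle : i ≤ last)
    (hg : s[last]? = some '>') (hnl : ∀ m, i ≤ m → m < last → s[m]? ≠ some '\n') :
    aLoop3 s i last acc = acc ++ (s.drop i).take (last - i) := by
  have hlast : last < s.length := by
    by_contra hh
    rw [List.getElem?_eq_none (by omega)] at hg
    simp at hg
  rw [aLoop3]
  split
  · rename_i hi
    by_cases heq : i = last
    · subst heq
      have hgi : s[i] = '>' := by
        rw [List.getElem?_eq_getElem hi] at hg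
        exact Option.some.inj hg
      rw [if_pos (by simp [hgi]), if_pos ⟨hgi, rfl⟩]
      simp
    · have hlt : i < last := by omega
      have hni : s[i]? ≠ some '\n' := hnl i le_rfl hlt
      rw [List.getElem?_eq_getElem hi] at hni
      have hni' : s[i] ≠ '\n' := by simpa using hni
      rw [if_pos hni']
      rw [if_neg (by rintro ⟨-, h'⟩; omega)]
      rw [aLoop3_break s (i+1) last (acc ++ [s[i]]) (by omega) hg
        (fun m h1 h2 => hnl m (by omega) h2)]
      rw [List.drop_eq_getElem_cons hi]
      rw [show last - i = (last - (i+1)) + 1 by omega, List.take_succ_cons]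
      simp
  · rename_i hi
    exact absurd (by omega : i < s.length) hi
termination_by s.length - i

theorem pvA_eq (str : String) :
    str_to_token str =
      [String.ofList (pvTT str.toList),
       String.ofList (pvContentAt str.toList (pvStart str.toList) (pvLast str.toList))] := by
  simp only [str_to_token]
  rw [aLoop1_eq]
  simp only [List.nil_append, pvLast]
  have hstart : 1 + ((str.toList.drop 1).takeWhile (· != ',')).length + 2 = pvStart str.toList := by
    simp only [pvStart, pvTT, pvTw]; omega
  rw [hstart]
  have hP := aLoop2_spec str.toList 0 0 (Nat.zero_le _)
    (Or.inl ⟨rfl, fun i h1 h2 => absurd h2 (by omega)⟩)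
  have hTT : (str.toList.drop 1).takeWhile (· != ',') = pvTT str.toList := rfl
  rw [hTT]
  by_cases hge : pvStart str.toList ≤ aLoop2 str.toList 0 0
  · rcases hP with ⟨hz, _⟩ | ⟨hlt, hgt, hno⟩
    · exact absurd hge (by simp [pvStart, hz])
    · rw [aLoop3_break _ _ _ _ hge hgt
        (fun m h1 h2 => pvTwPred '\n' _ m (by
          have he : (pvTw '\n' str.toList).length = pvFNL str.toList := rfl
          omega))]
      simp only [pvContentAt, if_pos hge, List.nil_append]
  · rw [aLoop3_no_break _ _ _ _ (by omega)]
    simp only [pvContentAt, if_neg hge, List.nil_append, pvTw]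

theorem pvB_eq (str : String) (h1 : 1 ≤ str.toList.length) :
    str_to_token_alt str =
      [String.ofList (pvTT str.toList),
       String.ofList (pvContentAt str.toList (pvStart str.toList) (pvLast str.toList))] := by
  have hfnle : pvFNL str.toList ≤ str.toList.length := pvTwLe '\n' str.toList
  simp only [str_to_token_alt]
  have hcomma : (if PySem.Chars.findFrom str.toList [','] 1 = -1 then ((str.toList.length : Nat) : Int)
      else PySem.Chars.findFrom str.toList [','] 1) = ((1 + (pvTT str.toList).length : Nat) : Int) := by
    have hf := PySem.Chars.findFrom_natCast str.toList [','] 1 h1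
    rw [pvFindSingle (str.toList.drop 1) ','] at hf
    by_cases hm : ',' ∈ str.toList.drop 1
    · rw [if_pos hm] at hf
      rw [if_neg (show ¬(((pvTw ',' (str.toList.drop 1)).length : Int) = -1) from by omega)] at hf
      rw [Nat.cast_one] at hf
      rw [hf]
      rw [if_neg (show ¬((1 : Int) + ((pvTw ',' (str.toList.drop 1)).length : Int) = -1) from by omega)]
      simp only [pvTT]
      push_cast
      ring
    · rw [if_neg hm, if_pos rfl, Nat.cast_one] at hf
      rw [hf, if_pos rfl]
      have he : pvTw ',' (str.toList.drop 1) = str.toList.drop 1 := pvTwAll ',' _ hm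
      simp only [pvTT, he, List.length_drop]
      omega
  rw [hcomma]
  have hstart : ((1 + (pvTT str.toList).length : Nat) : Int) + 2 = ((pvStart str.toList : Nat) : Int) := by
    simp only [pvStart]
    push_cast
    ring
  rw [hstart]
  have hlimit : (if PySem.Chars.find str.toList ['\n'] ≠ -1 then PySem.Chars.find str.toList ['\n']
      else ((str.toList.length : Nat) : Int)) = ((pvFNL str.toList : Nat) : Int) := by
    rw [pvFindSingle str.toList '\n']
    by_cases hm : '\n' ∈ str.toList
    · rw [if_pos hm]
      rw [if_pos (show (((pvTw '\n' str.toList).length : Int)) ≠ -1 from by omega)]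
      simp [pvFNL]
    · rw [if_neg hm, if_neg (by simp)]
      have he := pvTwAll '\n' str.toList hm
      simp [pvFNL, he]
  rw [hlimit]
  have hP := aLoop2_spec str.toList 0 0 (Nat.zero_le _)
    (Or.inl ⟨rfl, fun i hA hB => absurd hB (by omega)⟩)
  have htk : (str.toList.take (pvFNL str.toList)).length = pvFNL str.toList := by
    rw [List.length_take]
    omega
  have hred : PySem.Chars.rfindFrom str.toList ['>'] 0 (some ((pvFNL str.toList : Nat) : Int))
      = PySem.Chars.rfind (str.toList.take (pvFNL str.toList)) ['>'] := by
    have hc1 : ¬ ((str.toList.length : Int) < ((pvFNL str.toList : Nat) : Int)) := by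
      exact_mod_cast Nat.not_lt.mpr hfnle
    have hc2 : ¬ (((pvFNL str.toList : Nat) : Int) < 0) := by omega
    simp only [PySem.Chars.rfindFrom, hc1, hc2, if_false]
    norm_num
    split <;> omega
  have hlastv : (if PySem.Chars.rfindFrom str.toList ['>'] 0 (some ((pvFNL str.toList : Nat) : Int)) = -1
      then (0 : Int) else PySem.Chars.rfindFrom str.toList ['>'] 0 (some ((pvFNL str.toList : Nat) : Int)))
      = ((pvLast str.toList : Nat) : Int) := by
    rw [hred]
    simp only [pvLast]
    rcases hP with ⟨hz, hno⟩ | ⟨hlt, hgt, hno⟩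
    · have hm1 : PySem.Chars.rfind (str.toList.take (pvFNL str.toList)) ['>'] = -1 := by
        rw [PySem.Chars.rfind]
        apply pvRgoNone
        intro i hi
        rw [List.getElem?_take]
        split
        · rename_i hilt
          exact hno i (Nat.zero_le _) hilt
        · simp
      rw [hm1, if_pos rfl, hz]
      simp
    · have hm1 : PySem.Chars.rfind (str.toList.take (pvFNL str.toList)) ['>']
          = ((aLoop2 str.toList 0 0 : Nat) : Int) := by
        rw [PySem.Chars.rfind, htk]
        apply pvRgoEq _ _ (aLoop2 str.toList 0 0) (pvFNL str.toList) (by omega)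
        · rw [List.getElem?_take, if_pos hlt]
          exact hgt
        · intro i hgt2 hle2
          rw [List.getElem?_take]
          split
          · rename_i hilt
            exact hno i (by omega) hilt
          · simp
      rw [hm1]
      rw [if_neg (show ¬(((aLoop2 str.toList 0 0 : Nat) : Int) = -1) from by omega)]
  rw [hlastv]
  have htt : PySem.Chars.slice str.toList (some 1) (some ((1 + (pvTT str.toList).length : Nat) : Int))
      = pvTT str.toList := by
    rw [PySem.Chars.slice_eq_listSlice, show (1 : Int) = ((1 : Nat) : Int) from by norm_num,
      PySem.List.slice_natCast]
    rw [show 1 + (pvTT str.toList).length - 1 = (pvTT str.toList).length from by omega]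
    simp only [pvTT, pvTw]
    exact pvTakeTw _ _
  rw [htt]
  by_cases hge : pvStart str.toList ≤ pvLast str.toList
  · rw [if_pos (show ((pvLast str.toList : Nat) : Int) ≥ ((pvStart str.toList : Nat) : Int) from
      by exact_mod_cast hge)]
    have hcon : PySem.Chars.slice str.toList (some ((pvStart str.toList : Nat) : Int))
        (some ((pvLast str.toList : Nat) : Int))
        = pvContentAt str.toList (pvStart str.toList) (pvLast str.toList) := by
      rw [PySem.Chars.slice_eq_listSlice, PySem.List.slice_natCast]
      simp only [pvContentAt, if_pos hge]
    rw [hcon]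
  · rw [if_neg (show ¬(((pvLast str.toList : Nat) : Int) ≥ ((pvStart str.toList : Nat) : Int)) from by
      push_cast
      omega)]
    by_cases hsn : pvStart str.toList ≤ str.toList.length
    · have hf2 := PySem.Chars.findFrom_natCast str.toList ['\n'] (pvStart str.toList) hsn
      rw [pvFindSingle (str.toList.drop (pvStart str.toList)) '\n'] at hf2
      by_cases hm : '\n' ∈ str.toList.drop (pvStart str.toList)
      · rw [if_pos hm] at hf2
        rw [if_neg (show ¬(((pvTw '\n' (str.toList.drop (pvStart str.toList))).length : Int) = -1)
          from by omega)] at hf2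
        rw [hf2]
        rw [if_pos (show ((pvStart str.toList : Nat) : Int)
            + ((pvTw '\n' (str.toList.drop (pvStart str.toList))).length : Int) ≠ -1 from by omega)]
        have hcast : ((pvStart str.toList : Nat) : Int)
            + ((pvTw '\n' (str.toList.drop (pvStart str.toList))).length : Int)
            = (((pvStart str.toList) + (pvTw '\n' (str.toList.drop (pvStart str.toList))).length : Nat) : Int) := by
          push_cast
          ring
        rw [hcast, PySem.Chars.slice_eq_listSlice, PySem.List.slice_natCast]
        rw [show (pvStart str.toList) + (pvTw '\n' (str.toList.drop (pvStart str.toList))).length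
            - pvStart str.toList = (pvTw '\n' (str.toList.drop (pvStart str.toList))).length from by omega]
        simp only [pvContentAt, if_neg hge, pvTw]
        rw [pvTakeTw]
      · rw [if_neg hm, if_pos rfl] at hf2
        rw [hf2]
        rw [if_neg (by simp)]
        rw [PySem.Chars.slice_eq_listSlice, PySem.List.slice_natCast]
        rw [List.take_of_length_le (by rw [List.length_drop])]
        simp only [pvContentAt, if_neg hge]
        rw [pvTwAll '\n' _ hm]
    · have hnone : PySem.Chars.findFrom str.toList ['\n'] ((pvStart str.toList : Nat) : Int) = -1 := by
        simp only [PySem.Chars.findFrom]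
        rw [if_neg (show ¬(((pvStart str.toList : Nat) : Int) < 0) from by omega)]
        rw [if_pos (show ((str.toList.length : Nat) : Int) < ((pvStart str.toList : Nat) : Int) from
          by exact_mod_cast (by omega : str.toList.length < pvStart str.toList))]
      rw [hnone]
      rw [if_neg (by simp)]
      rw [PySem.Chars.slice_eq_listSlice, PySem.List.slice_natCast]
      have hd : str.toList.drop (pvStart str.toList) = [] := List.drop_eq_nil_of_le (by omega)
      simp [pvContentAt, if_neg hge, hd, pvTw]

theorem pvMain (str : String) : str_to_token str = str_to_token_alt str := by
  rcases Nat.eq_zero_or_pos str.toList.length with hz | hp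
  · have hnil : str.toList = [] := by
      cases h : str.toList with
      | nil => rfl
      | cons a t => rw [h] at hz; simp at hz
    rw [pvA_eq]
    have hlast0 : pvLast str.toList = 0 := by
      have hP := aLoop2_spec str.toList 0 0 (Nat.zero_le _)
        (Or.inl ⟨rfl, fun i hA hB => absurd hB (by omega)⟩)
      rcases hP with ⟨h, _⟩ | ⟨h, _, _⟩
      · exact h
      · rw [hnil] at h; simp [pvFNL, pvTw] at h
    rw [hlast0, hnil]
    simp only [str_to_token_alt, hnil]
    decide
  · rw [pvA_eq, pvB_eq str hp]

-- ===== VERDICT (by name: the statement is the Claim_ definition above) =====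
theorem str_to_token_spec : Claim_equal_str_to_token := by
  intro str _
  unfold Spec_str_to_token
  exact pvMain str
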